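-- pv_equiv track=rewrite | github.com/pragyatk/Chess-GUI | play_chess.py | flip_board
-- ===== SOURCE A (Python) =====
-- def flip_board(board):
--     board = str(board)
--     rows = board.split('\n')
--     inverse_rows = [rows[i] for i in range(len(rows)-1, -1, -1)]
--     board_str = ""
--     for inv_row in inverse_rows:
--         board_str += f"{inv_row[-1::-1]}\n"
--     return board_str.strip("\n")
-- ===== SOURCE B (Python) =====
-- def flip_board(board):
--     # Reversing the whole newline-joined board string reverses both the row
--     # order and each row's characters at once; strip('\n') matches A's strip.
--     return str(board)[::-1].strip("\n")
-- ===== Notes on version B (the rewrite author's own statement) =====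
-- stated objective: simpler
-- what changed: Replaces split/index-loop/reverse-each-row/join with a single whole-string reversal via slicing followed by a strip of newline characters, using the fact that reversing a newline-joined string reverses rows and characters together.
import Mathlib
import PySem

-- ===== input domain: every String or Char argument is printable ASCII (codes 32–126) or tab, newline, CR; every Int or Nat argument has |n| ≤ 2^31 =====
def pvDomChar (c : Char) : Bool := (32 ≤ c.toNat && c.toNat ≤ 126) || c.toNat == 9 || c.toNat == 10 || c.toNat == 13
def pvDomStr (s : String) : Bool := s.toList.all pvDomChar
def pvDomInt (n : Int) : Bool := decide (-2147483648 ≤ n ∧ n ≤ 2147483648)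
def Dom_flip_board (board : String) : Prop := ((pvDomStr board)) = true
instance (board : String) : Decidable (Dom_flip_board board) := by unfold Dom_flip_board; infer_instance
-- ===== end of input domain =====

-- B replaces A's split / reverse-index loop / per-row reversal / join with a single
-- whole-string reversal via slicing followed by a strip of newline characters (objective: simpler).

-- ===== PORT A =====
-- rows[i] is always in range here, so pyGetD's default is never used.
def flip_board (board : String) : String :=
  let rows : List String := (PySem.Str.split? board "\n").getD []
  let inverse_rows : List String :=
    (PySem.List.pyRange ((PySem.List.len rows) - 1) (-1) (-1)).map
      (fun i => PySem.List.pyGetD rows i "")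
  let board_str : String :=
    inverse_rows.foldl
      (fun acc inv_row =>
        PySem.Str.join "" [acc, (PySem.Str.slice? inv_row (some (-1)) none (-1)).getD "", "\n"])
      ""
  PySem.Str.stripChars board_str "\n"

-- ===== PORT B =====
def flip_board_alt (board : String) : String :=
  PySem.Str.stripChars ((PySem.Str.slice? board none none (-1)).getD "") "\n"

-- ===== PRECONDITION & SPEC =====
def Spec_flip_board (board : String) (out : String) : Prop := out = flip_board_alt board
instance (board : String) (out : String) : Decidable (Spec_flip_board board out) := by unfold Spec_flip_board; infer_instance

-- ===== CLAIM (what is proved, stated in full; the proofs are below) =====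
def Claim_equal_flip_board : Prop := ∀ (board : String), Dom_flip_board board → Spec_flip_board board (flip_board board)

-- ===== LEMMAS AND PROOFS =====

-- xs[-1::-1] is the same as xs[::-1]
theorem slice?_start_neg_one {α : Type} (xs : List α) :
    PySem.List.slice? xs (some (-1)) none (-1) = some xs.reverse := by
  have h : PySem.List.slice? xs (some (-1)) none (-1) = PySem.List.slice? xs none none (-1) := by
    simp [PySem.List.slice?, PySem.List.sliceIndices]
    ring_nf
  rw [h, PySem.List.slice?_none_none_neg_one]

-- a simple split-on-'\n' recursion mirroring splitOn.go
def splitAuxNL : List Char → List Char → List (List Char)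
  | [], cur => [cur.reverse]
  | c :: rest, cur =>
      if c = '\n' then cur.reverse :: splitAuxNL rest [] else splitAuxNL rest (c :: cur)

theorem splitAuxNL_ne_nil : ∀ (l cur : List Char), splitAuxNL l cur ≠ [] := by
  intro l
  induction l with
  | nil => intro cur; simp [splitAuxNL]
  | cons c rest ih =>
      intro cur
      by_cases h : c = '\n' <;> simp [splitAuxNL, h]
      exact ih _

theorem splitOn_go_eq (l : List Char) : ∀ (k : Nat) (cur : List Char) (acc : List (List Char)),
    PySem.Chars.splitOn.go ['\n'] (l.length + k + 1) l cur acc = acc.reverse ++ splitAuxNL l cur := by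
  induction l with
  | nil =>
      intro k cur acc
      rw [show ([] : List Char).length + k + 1 = k + 1 from by simp, PySem.Chars.splitOn.go]
      · simp [splitAuxNL]
      · omega
  | cons c rest ih =>
      intro k cur acc
      rw [show (c :: rest).length + k + 1 = (rest.length + k + 1) + 1 from by simp; omega,
        PySem.Chars.splitOn.go]
      by_cases h : c = '\n'
      · have hp : (['\n'] : List Char).isPrefixOf (c :: rest) = true := by simp [h, List.isPrefixOf]
        simp only [hp, if_pos]
        rw [show List.drop (['\n'] : List Char).length (c :: rest) = rest from by simp]
        rw [ih k [] (cur.reverse :: acc)]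
        simp [splitAuxNL, h]
      · have hp : (['\n'] : List Char).isPrefixOf (c :: rest) = false := by
          simp [List.isPrefixOf]
          exact fun hc => h hc.symm
        simp only [hp]
        rw [if_neg (by simp)]
        rw [ih k (c :: cur) acc]
        simp [splitAuxNL, h]

theorem splitOn_eq_splitAuxNL (l : List Char) :
    PySem.Chars.splitOn l ['\n'] = splitAuxNL l [] := by
  have := splitOn_go_eq l 0 [] []
  simpa [PySem.Chars.splitOn] using this

theorem join_splitAuxNL (l : List Char) : ∀ cur : List Char,
    PySem.Chars.join ['\n'] (splitAuxNL l cur) = cur.reverse ++ l := by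
  induction l with
  | nil => intro cur; simp [splitAuxNL, PySem.Chars.join_singleton]
  | cons c rest ih =>
      intro cur
      by_cases h : c = '\n'
      · rw [show splitAuxNL (c :: rest) cur = cur.reverse :: splitAuxNL rest [] from by
          simp [splitAuxNL, h]]
        obtain ⟨p, t, hpt⟩ : ∃ p t, splitAuxNL rest [] = p :: t := by
          cases hs : splitAuxNL rest [] with
          | nil => exact absurd hs (splitAuxNL_ne_nil rest [])
          | cons p t => exact ⟨p, t, rfl⟩
        rw [hpt, PySem.Chars.join_cons_cons, ← hpt, ih []]
        simp [h]
      · rw [show splitAuxNL (c :: rest) cur = splitAuxNL rest (c :: cur) from by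
          simp [splitAuxNL, h]]
        rw [ih (c :: cur)]
        simp

theorem join_append_singleton (y : List Char) : ∀ (X : List (List Char)), X ≠ [] →
    PySem.Chars.join ['\n'] (X ++ [y]) = PySem.Chars.join ['\n'] X ++ '\n' :: y := by
  intro X
  induction X with
  | nil => intro h; exact absurd rfl h
  | cons a t ih =>
      intro _
      cases t with
      | nil => simp [PySem.Chars.join_singleton, PySem.Chars.join_cons_cons]
      | cons b u =>
          rw [show (a :: b :: u) ++ [y] = a :: ((b :: u) ++ [y]) from rfl]
          rw [show a :: ((b :: u) ++ [y]) = a :: (b :: (u ++ [y])) from rfl]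
          rw [PySem.Chars.join_cons_cons, PySem.Chars.join_cons_cons]
          rw [show b :: (u ++ [y]) = (b :: u) ++ [y] from rfl, ih (by simp)]
          simp

theorem join_reverse_map (L : List (List Char)) :
    (PySem.Chars.join ['\n'] L).reverse =
      PySem.Chars.join ['\n'] (L.reverse.map List.reverse) := by
  induction L with
  | nil => simp [PySem.Chars.join_nil]
  | cons a t ih =>
      cases t with
      | nil => simp [PySem.Chars.join_singleton]
      | cons b u =>
          rw [PySem.Chars.join_cons_cons, show (a :: b :: u).reverse.map List.reverse
              = ((b :: u).reverse.map List.reverse) ++ [a.reverse] from by simp]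
          rw [join_append_singleton _ _ (by simp)]
          rw [← ih]
          simp

theorem flatMap_newline (L : List (List Char)) (h : L ≠ []) :
    L.flatMap (fun r => r ++ ['\n']) = PySem.Chars.join ['\n'] L ++ ['\n'] := by
  induction L with
  | nil => exact absurd rfl h
  | cons a t ih =>
      cases t with
      | nil => simp [PySem.Chars.join_singleton]
      | cons b u =>
          rw [PySem.Chars.join_cons_cons]
          rw [List.flatMap_cons, ih (by simp)]
          simp

theorem stripChars_append_newline (x : List Char) :
    PySem.Chars.stripChars (x ++ ['\n']) ['\n'] = PySem.Chars.stripChars x ['\n'] := by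
  show (List.dropWhile (fun c => (['\n'] : List Char).contains c)
      (List.dropWhile (fun c => (['\n'] : List Char).contains c) (x ++ ['\n'])).reverse).reverse
    = (List.dropWhile (fun c => (['\n'] : List Char).contains c)
      (List.dropWhile (fun c => (['\n'] : List Char).contains c) x).reverse).reverse
  set p : Char → Bool := fun c => (['\n'] : List Char).contains c with hp
  rw [List.dropWhile_append]
  by_cases h : (List.dropWhile p x).isEmpty
  · rw [if_pos h]
    have hx : List.dropWhile p x = [] := by simpa [List.isEmpty_iff] using h
    rw [hx]
    simp [hp]
  · rw [if_neg h, List.reverse_append]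
    have h2 : (['\n'] : List Char).reverse ++ (List.dropWhile p x).reverse
        = '\n' :: (List.dropWhile p x).reverse := by simp
    rw [h2]
    have h3 : List.dropWhile p ('\n' :: (List.dropWhile p x).reverse)
        = List.dropWhile p ((List.dropWhile p x).reverse) := by
      simp [List.dropWhile, hp]
    rw [h3]

-- the fold in A, at the character level
theorem foldl_rows (L : List String) : ∀ acc : String,
    (L.foldl (fun acc inv_row =>
        PySem.Str.join "" [acc, (PySem.Str.slice? inv_row (some (-1)) none (-1)).getD "", "\n"])
      acc).toList
      = acc.toList ++ L.flatMap (fun r => r.toList.reverse ++ ['\n']) := by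
  induction L with
  | nil => intro acc; simp
  | cons r t ih =>
      intro acc
      rw [List.foldl_cons, ih]
      have hs : (PySem.Str.slice? r (some (-1)) none (-1)).getD "" =
          String.ofList r.toList.reverse := by
        simp [PySem.Str.slice?, PySem.Chars.slice?_eq_listSlice?, slice?_start_neg_one]
      rw [hs]
      simp [PySem.Str.toList_join, PySem.Chars.join, List.intercalate, List.intersperse]

-- A's inverse_rows is rows.reverse
theorem inverse_rows_eq (rows : List String) :
    (PySem.List.pyRange ((PySem.List.len rows) - 1) (-1) (-1)).map
      (fun i => PySem.List.pyGetD rows i "") = rows.reverse := by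
  have h1 : PySem.List.pyRange ((PySem.List.len rows) - 1) (-1) (-1)
      = (PySem.List.pyRange 0 (PySem.List.len rows)).reverse := by
    have := PySem.List.pyRange_neg_one_eq_reverse ((PySem.List.len rows) - 1) (-1)
    simpa using this
  rw [h1, List.map_reverse]
  have h2 := PySem.List.map_pyGetD_pyRange rows "" (a := 0) le_rfl
  simp only [Int.toNat_zero, List.drop_zero] at h2
  rw [h2]

-- ===== VERDICT (by name: the statement is the Claim_ definition above) =====
theorem flip_board_spec : Claim_equal_flip_board := by
  unfold Claim_equal_flip_board Spec_flip_board
  intro board _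
  simp only [flip_board, flip_board_alt]
  rw [inverse_rows_eq]
  have hnl : ("\n" : String).toList = ['\n'] := by decide
  have hrows : (PySem.Str.split? board "\n").getD []
      = (splitAuxNL board.toList []).map String.ofList := by
    simp [PySem.Str.split?, PySem.Chars.split?, hnl, splitOn_eq_splitAuxNL]
  rw [hrows]
  have hB : (PySem.Str.slice? board none none (-1)).getD ""
      = String.ofList board.toList.reverse := by
    rw [PySem.Str.slice?_none_none_neg_one]; rfl
  rw [hB]
  -- reduce both sides to Chars.stripChars on char lists
  unfold PySem.Str.stripChars
  rw [hnl]
  apply congrArg String.ofList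
  rw [String.toList_ofList]
  rw [foldl_rows]
  have hflat : (((splitAuxNL board.toList []).map String.ofList).reverse).flatMap
      (fun r => r.toList.reverse ++ ['\n'])
      = board.toList.reverse ++ ['\n'] := by
    rw [show ((splitAuxNL board.toList []).map String.ofList).reverse
        = ((splitAuxNL board.toList []).reverse).map String.ofList from by
      rw [List.map_reverse]]
    rw [List.flatMap_map]
    have h1 : ((splitAuxNL board.toList []).reverse).flatMap
        (fun cs => (String.ofList cs).toList.reverse ++ ['\n'])
        = ((splitAuxNL board.toList []).reverse.map List.reverse).flatMap
            (fun r => r ++ ['\n']) := by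
      rw [List.flatMap_map]
      simp [String.toList_ofList]
    rw [h1, flatMap_newline _ (by
      simp [splitAuxNL_ne_nil])]
    rw [← join_reverse_map, join_splitAuxNL]
    simp
  rw [show (("" : String).toList) = [] from by decide, List.nil_append, hflat]
  exact stripChars_append_newline _
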